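-- pv_equiv track=rewrite | github.com/mohammad2012191/VideoAtlas | visualize_run.py | build_scratchpad_timeline
-- ===== SOURCE A (Python) =====
-- def build_scratchpad_timeline(classified):
--     """
--     For each frame index i return (current_sp_path, prev_sp_path).
--     current_sp_path — most recent scratchpad seen at or before frame i.
--     prev_sp_path    — the scratchpad before current_sp_path, used to diff
--                       and highlight newly added evidence items.
--     """
--     timeline = []
--     prev     = None
--     current  = None
--     for category, _label, img_path in classified:
--         if category == "scratchpad":
--             prev    = current
--             current = img_path
--         timeline.append((current, prev))
--     return timeline
-- ===== SOURCE B (Python) =====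
-- def build_scratchpad_timeline(classified):
--     classified = list(classified)
--     out = []
--     for i in range(len(classified)):
--         sps = [p for c, _l, p in classified[:i + 1] if c == "scratchpad"]
--         cur = sps[-1] if sps else None
--         prv = sps[-2] if len(sps) >= 2 else None
--         out.append((cur, prv))
--     return out
-- ===== Notes on version B (the rewrite author's own statement) =====
-- stated objective: alternative
-- what changed: Replaces A's single stateful pass (prev/current registers threaded through the loop) by a stateless per-index formulation: for each frame i, recompute the scratchpad paths of the prefix classified[:i+1] and read off its last and second-to-last elements.
import Mathlib
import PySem

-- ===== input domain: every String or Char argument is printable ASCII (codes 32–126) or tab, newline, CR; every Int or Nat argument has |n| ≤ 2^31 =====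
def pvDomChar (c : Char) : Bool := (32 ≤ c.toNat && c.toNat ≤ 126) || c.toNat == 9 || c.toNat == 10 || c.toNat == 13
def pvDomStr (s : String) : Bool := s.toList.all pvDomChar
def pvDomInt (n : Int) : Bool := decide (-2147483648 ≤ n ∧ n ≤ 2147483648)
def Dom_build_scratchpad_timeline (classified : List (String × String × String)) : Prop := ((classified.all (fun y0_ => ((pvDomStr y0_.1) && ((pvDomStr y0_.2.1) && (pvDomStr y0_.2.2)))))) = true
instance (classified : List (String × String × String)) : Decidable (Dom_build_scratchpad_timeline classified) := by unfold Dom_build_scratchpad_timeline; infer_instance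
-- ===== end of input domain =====

-- B recomputes each frame's answer from its prefix (stateless, quadratic) instead of A's
-- single stateful pass; alternative decomposition, return values proved identical.

-- ===== PORT A =====
-- the for-loop of A: state (prev, current), appending to timeline
def buildGoA : List (String × String × String) → Option String → Option String →
    List (Option String × Option String) → List (Option String × Option String)
  | [], _prev, _current, timeline => timeline
  | (category, _label, img_path) :: rest, prev, current, timeline =>
    if category = "scratchpad" then
      buildGoA rest current (some img_path) (timeline ++ [(some img_path, current)])
    else
      buildGoA rest prev current (timeline ++ [(current, prev)])

def build_scratchpad_timeline (classified : List (String × String × String)) : List (Option String × Option String) :=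
  buildGoA classified none none []

-- ===== PORT B =====
-- the comprehension [p for c, _l, p in … if c == "scratchpad"]
def spPaths (xs : List (String × String × String)) : List String :=
  xs.filterMap (fun t => if t.1 = "scratchpad" then some t.2.2 else none)

def build_scratchpad_timeline_alt (classified : List (String × String × String)) : List (Option String × Option String) :=
  (List.range classified.length).map (fun (i : Nat) =>
    let sps := spPaths (PySem.List.slice classified none (some ((i : Int) + 1)))
    let cur : Option String := if sps = [] then none else PySem.List.pyGet? sps (-1)
    let prv : Option String := if 2 ≤ sps.length then PySem.List.pyGet? sps (-2) else none
    (cur, prv))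

-- ===== PRECONDITION & SPEC =====
def Spec_build_scratchpad_timeline (classified : List (String × String × String)) (out : List (Option String × Option String)) : Prop := out = build_scratchpad_timeline_alt classified
instance (classified : List (String × String × String)) (out : List (Option String × Option String)) : Decidable (Spec_build_scratchpad_timeline classified out) := by unfold Spec_build_scratchpad_timeline; infer_instance

-- ===== CLAIM (what is proved, stated in full; the proofs are below) =====
def Claim_equal_build_scratchpad_timeline : Prop := ∀ (classified : List (String × String × String)), Dom_build_scratchpad_timeline classified → Spec_build_scratchpad_timeline classified (build_scratchpad_timeline classified)

-- ===== LEMMAS AND PROOFS =====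

-- 'current' after a prefix whose scratchpad paths are sps, starting from state cur
def curOf (cur : Option String) (sps : List String) : Option String :=
  match sps.getLast? with
  | none => cur
  | some a => some a

-- 'prev' after a prefix whose scratchpad paths are sps, starting from state (prev, cur)
def prvOf (prev cur : Option String) (sps : List String) : Option String :=
  match sps with
  | [] => prev
  | [_] => cur
  | _ :: _ :: _ => sps.dropLast.getLast?

theorem buildGoA_acc (l : List (String × String × String)) (prev cur : Option String)
    (acc : List (Option String × Option String)) :
    buildGoA l prev cur acc = acc ++ buildGoA l prev cur [] := by
  induction l generalizing prev cur acc with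
  | nil => simp [buildGoA]
  | cons x rest ih =>
    obtain ⟨c, lb, p⟩ := x
    by_cases h : c = "scratchpad"
    · simp only [buildGoA, h, if_pos, List.nil_append]
      rw [ih _ _ (acc ++ [(some p, cur)]), ih _ _ [(some p, cur)]]
      simp
    · simp only [buildGoA, h, if_neg, not_false_iff, List.nil_append]
      rw [ih _ _ (acc ++ [(cur, prev)]), ih _ _ [(cur, prev)]]
      simp

theorem curOf_cons (cur : Option String) (p : String) (s : List String) :
    curOf cur (p :: s) = curOf (some p) s := by
  cases s with
  | nil => simp [curOf]
  | cons a t =>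
    rcases hl : (a :: t).getLast? with _ | b
    · exact absurd hl (by simp)
    · simp [curOf, List.getLast?_cons_cons, hl]

theorem prvOf_cons (prev cur : Option String) (p : String) (s : List String) :
    prvOf prev cur (p :: s) = prvOf cur (some p) s := by
  match s with
  | [] => simp [prvOf]
  | [a] => simp [prvOf]
  | a :: b :: t =>
    show (p :: a :: b :: t).dropLast.getLast? = (a :: b :: t).dropLast.getLast?
    simp [List.dropLast_cons_of_ne_nil, List.getLast?_cons_cons]

theorem buildGoA_eq (l : List (String × String × String)) :
    ∀ (prev cur : Option String),
      buildGoA l prev cur [] = (List.range l.length).map (fun i =>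
        (curOf cur (spPaths (l.take (i + 1))), prvOf prev cur (spPaths (l.take (i + 1))))) := by
  induction l with
  | nil => intro prev cur; simp [buildGoA]
  | cons x rest ih =>
    intro prev cur
    obtain ⟨c, lb, p⟩ := x
    rw [List.length_cons, List.range_succ_eq_map, List.map_cons, List.map_map]
    by_cases h : c = "scratchpad"
    · subst h
      simp only [buildGoA, reduceIte]
      rw [buildGoA_acc, ih cur (some p)]
      simp only [List.nil_append, List.singleton_append]
      congr 1
      apply List.map_congr_left
      intro i _
      simp only [Function.comp, Nat.succ_eq_add_one]
      have htake : (("scratchpad", lb, p) :: rest).take (i + 1 + 1) = ("scratchpad", lb, p) :: rest.take (i + 1) := rfl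
      rw [htake]
      have hsp : spPaths (("scratchpad", lb, p) :: rest.take (i + 1)) = p :: spPaths (rest.take (i + 1)) := by
        simp [spPaths]
      rw [hsp, curOf_cons, prvOf_cons]
    · simp only [buildGoA, h, if_neg, not_false_iff]
      rw [buildGoA_acc, ih prev cur]
      simp only [List.nil_append, List.singleton_append]
      congr 1
      · show ((cur : Option String), prev) =
          (curOf cur (spPaths (((c, lb, p) :: rest).take 1)), prvOf prev cur (spPaths (((c, lb, p) :: rest).take 1)))
        simp [spPaths, h, curOf, prvOf]
      · apply List.map_congr_left
        intro i _
        simp only [Function.comp, Nat.succ_eq_add_one]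
        have htake : ((c, lb, p) :: rest).take (i + 1 + 1) = (c, lb, p) :: rest.take (i + 1) := rfl
        rw [htake]
        have hsp : spPaths ((c, lb, p) :: rest.take (i + 1)) = spPaths (rest.take (i + 1)) := by
          simp [spPaths, h]
        rw [hsp]

theorem cur_eq (sps : List String) :
    (if sps = [] then none else PySem.List.pyGet? sps (-1)) = curOf none sps := by
  cases sps with
  | nil => simp [curOf]
  | cons a t =>
    simp only [reduceCtorEq, if_neg, not_false_iff, PySem.List.pyGet?_neg_one]
    rcases hl : (a :: t).getLast? with _ | b
    · exact absurd hl (by simp)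
    · simp [curOf, hl]

theorem prv_eq (sps : List String) :
    (if 2 ≤ sps.length then PySem.List.pyGet? sps (-2) else none) = prvOf none none sps := by
  match sps with
  | [] => simp [prvOf]
  | [a] => simp [prvOf]
  | a :: b :: t =>
    have hlen : 2 ≤ (a :: b :: t).length := by simp only [List.length_cons]; omega
    rw [if_pos hlen, PySem.List.pyGet?_neg_ofNat _ 2 (by omega) hlen]
    show (a :: b :: t)[(a :: b :: t).length - 2]? = (a :: b :: t).dropLast.getLast?
    rw [List.getLast?_eq_getElem?, List.length_dropLast, List.getElem?_dropLast]
    have h2 : (a :: b :: t).length - 1 - 1 = (a :: b :: t).length - 2 := by omega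
    rw [h2, if_pos (by simp only [List.length_cons]; omega)]

-- ===== VERDICT (by name: the statement is the Claim_ definition above) =====
theorem build_scratchpad_timeline_spec : Claim_equal_build_scratchpad_timeline := by
  intro classified _
  show build_scratchpad_timeline classified = build_scratchpad_timeline_alt classified
  unfold build_scratchpad_timeline
  rw [buildGoA_eq]
  simp only [build_scratchpad_timeline_alt]
  apply List.map_congr_left
  intro i hi
  have hslice : PySem.List.slice classified none (some ((i : Int) + 1)) = classified.take (i + 1) := by
    have hc : ((i : Int) + 1) = ((i + 1 : Nat) : Int) := by push_cast; ring
    rw [hc, PySem.List.slice_to_natCast]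
  simp only [hslice, cur_eq, prv_eq]
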